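-- pv_equiv track=rewrite | github.com/judsonldq/nilab | 2019/ChenBin/code/ECG/data_process/generate_sample_fixed.py | find_Rtime
-- ===== SOURCE A (Python) =====
-- def find_Rtime(label_time, data_time):
--     """
--     获得R波尖峰所在时间轴对应下标位置
--     :param label_time: list R波尖峰标签时间的列表
--     :param data_time: list 心跳数据记录点时间的列表
--     :return: Rtime: list R波尖峰所对应的心跳数据时间下标的列表
--     """
--     j = 0
--     Rtime = []
--     for i in range(len(data_time) - 1):
--         if j < len(label_time):
--             if data_time[i] <= label_time[j] < data_time[i + 1]:
--                 Rtime.append(i)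
--                 j += 1
--         else:
--             break
--     return Rtime
-- ===== SOURCE B (Python) =====
-- def find_Rtime(label_time, data_time):
--     """Loop inverted w.r.t. A: iterate over the labels and advance a shared
--     cursor over data_time until the containing interval is found; no counter j,
--     and the scan stops as soon as a label cannot be placed."""
--     n = len(data_time)
--     i = 0
--     Rtime = []
--     for t in label_time:
--         while i < n - 1 and not (data_time[i] <= t < data_time[i + 1]):
--             i += 1
--         if i >= n - 1:
--             break
--         Rtime.append(i)
--         i += 1
--     return Rtime
-- ===== Notes on version B (the rewrite author's own statement) =====
-- stated objective: alternative
-- what changed: Inverts the loop structure: instead of A's single pass over all data_time interval indices with a label pointer j, B iterates over the labels and advances a shared cursor with an inner while-search, breaking as soon as a label cannot be placed; each data interval is examined at most once in total.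
import Mathlib
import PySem

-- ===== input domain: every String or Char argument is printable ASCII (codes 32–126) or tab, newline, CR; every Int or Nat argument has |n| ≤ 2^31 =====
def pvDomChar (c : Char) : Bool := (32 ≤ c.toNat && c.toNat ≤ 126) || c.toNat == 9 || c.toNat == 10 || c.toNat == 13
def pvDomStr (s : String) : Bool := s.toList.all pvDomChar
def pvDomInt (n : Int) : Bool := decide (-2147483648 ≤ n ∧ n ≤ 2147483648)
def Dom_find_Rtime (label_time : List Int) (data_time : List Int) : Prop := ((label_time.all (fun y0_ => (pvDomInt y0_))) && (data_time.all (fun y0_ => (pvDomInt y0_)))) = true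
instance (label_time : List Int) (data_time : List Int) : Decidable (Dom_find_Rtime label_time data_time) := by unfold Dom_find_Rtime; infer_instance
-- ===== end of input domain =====

-- B inverts A's loop: outer iteration over the labels with an inner cursor-advancing while, instead of one pass over all interval indices with a label pointer; same cost, proven equal on every input.


-- ===== PORT A =====
-- fold over range(len(data_time)-1) with state (j, Rtime); the 'break' when j exhausts label_time
-- is the state-preserving branch (nothing changes afterwards). Indices are always in range, so getD is exact.
def find_Rtime (label_time : List Int) (data_time : List Int) : List Int :=
  (((List.range (data_time.length - 1)).foldl
    (fun (st : Nat × List Int) (i : Nat) =>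
      if st.1 < label_time.length then
        if data_time.getD i 0 ≤ label_time.getD st.1 0 ∧
           label_time.getD st.1 0 < data_time.getD (i + 1) 0 then
          (st.1 + 1, st.2 ++ [(i : Int)])
        else st
      else st)
    (0, ([] : List Int)))).2

-- ===== PORT B =====
-- Source B's inner 'while i < n - 1 and not (data_time[i] <= t < data_time[i+1]): i += 1':
-- returns the cursor position where the while-loop stops (indices in range, so getD is exact)
def advanceCursor (d : List Int) (t : Int) (i : Nat) : Nat :=
  if _h : i < d.length - 1 then
    if ¬ (d.getD i 0 ≤ t ∧ t < d.getD (i + 1) 0) then advanceCursor d t (i + 1) else i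
  else i
termination_by d.length - 1 - i
decreasing_by all_goals omega

-- Source B's 'for t in label_time' with shared cursor i and early break
def altLoop (d : List Int) : List Int → Nat → List Int
  | [], _ => []
  | t :: ts, i =>
    let i' := advanceCursor d t i
    if d.length - 1 ≤ i' then [] else (i' : Int) :: altLoop d ts (i' + 1)

def find_Rtime_alt (label_time : List Int) (data_time : List Int) : List Int :=
  altLoop data_time label_time 0

-- ===== PRECONDITION & SPEC =====
def Spec_find_Rtime (label_time : List Int) (data_time : List Int) (out : List Int) : Prop := out = find_Rtime_alt label_time data_time
instance (label_time : List Int) (data_time : List Int) (out : List Int) : Decidable (Spec_find_Rtime label_time data_time out) := by unfold Spec_find_Rtime; infer_instance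

-- ===== CLAIM (what is proved, stated in full; the proofs are below) =====
def Claim_equal_find_Rtime : Prop := ∀ (label_time : List Int) (data_time : List Int), Dom_find_Rtime label_time data_time → Spec_find_Rtime label_time data_time (find_Rtime label_time data_time)

-- ===== LEMMAS AND PROOFS =====

-- forward-recursive reformulation of A's scan, the bridge between the two ports
def scanA (d : List Int) (ls : List Int) (i : Nat) : List Int :=
  if _h : i < d.length - 1 then
    match ls with
    | [] => []
    | t :: ts =>
      if d.getD i 0 ≤ t ∧ t < d.getD (i + 1) 0 then (i : Int) :: scanA d ts (i + 1)
      else scanA d (t :: ts) (i + 1)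
  else []
termination_by d.length - 1 - i
decreasing_by all_goals omega

theorem scanA_nil (d : List Int) (i : Nat) : scanA d [] i = [] := by
  unfold scanA; split <;> rfl

theorem foldA_eq_scanA (label d : List Int) :
    ∀ (m i : Nat) (j : Nat) (R : List Int), i + m = d.length - 1 →
    ((List.range' i m).foldl
      (fun (st : Nat × List Int) (i : Nat) =>
        if st.1 < label.length then
          if d.getD i 0 ≤ label.getD st.1 0 ∧ label.getD st.1 0 < d.getD (i + 1) 0 then
            (st.1 + 1, st.2 ++ [(i : Int)])
          else st
        else st)
      (j, R)).2 = R ++ scanA d (label.drop j) i := by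
  intro m
  induction m with
  | zero =>
    intro i j R hi
    rw [show List.range' i 0 = [] from rfl, List.foldl_nil, scanA.eq_def, dif_neg (by omega)]
    simp
  | succ m ih =>
    intro i j R hi
    rw [List.range'_succ, List.foldl_cons]
    by_cases hj : j < label.length
    · have hdrop : label.drop j = label.getD j 0 :: label.drop (j + 1) := by
        rw [List.drop_eq_getElem_cons hj]
        simp [List.getD_eq_getElem?_getD, List.getElem?_eq_getElem hj]
      by_cases hc : d.getD i 0 ≤ label.getD j 0 ∧ label.getD j 0 < d.getD (i + 1) 0
      · rw [show (if (j, R).1 < label.length then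
              if d.getD i 0 ≤ label.getD (j, R).1 0 ∧ label.getD (j, R).1 0 < d.getD (i + 1) 0 then
                ((j, R).1 + 1, (j, R).2 ++ [(i : Int)]) else (j, R)
            else (j, R)) = (j + 1, R ++ [(i : Int)]) from by
          simp only [if_pos hj, if_pos hc]]
        rw [ih (i + 1) (j + 1) (R ++ [(i : Int)]) (by omega)]
        rw [hdrop]
        conv_rhs => rw [scanA]
        rw [dif_pos (by omega), if_pos hc]
        simp
      · rw [show (if (j, R).1 < label.length then
              if d.getD i 0 ≤ label.getD (j, R).1 0 ∧ label.getD (j, R).1 0 < d.getD (i + 1) 0 then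
                ((j, R).1 + 1, (j, R).2 ++ [(i : Int)]) else (j, R)
            else (j, R)) = (j, R) from by
          simp only [if_pos hj, if_neg hc]]
        rw [ih (i + 1) j R (by omega)]
        rw [hdrop]
        conv_rhs => rw [scanA]
        rw [dif_pos (by omega)]
        rw [if_neg hc]
    · rw [show (if (j, R).1 < label.length then
            if d.getD i 0 ≤ label.getD (j, R).1 0 ∧ label.getD (j, R).1 0 < d.getD (i + 1) 0 then
              ((j, R).1 + 1, (j, R).2 ++ [(i : Int)]) else (j, R)
          else (j, R)) = (j, R) from by simp only [if_neg hj]]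
      rw [ih (i + 1) j R (by omega)]
      have hdrop : label.drop j = [] := List.drop_eq_nil_of_le (by omega)
      rw [hdrop, scanA_nil, scanA_nil]

theorem find_Rtime_eq_scanA (label d : List Int) :
    find_Rtime label d = scanA d label 0 := by
  unfold find_Rtime
  rw [List.range_eq_range']
  rw [foldA_eq_scanA label d (d.length - 1) 0 0 [] (by omega)]
  simp

theorem advanceCursor_ge (d : List Int) (t : Int) (i : Nat) : i ≤ advanceCursor d t i := by
  fun_induction advanceCursor with
  | case1 i h hc ih => omega
  | case2 i h hc => exact le_refl _
  | case3 i h => exact le_refl _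

theorem scanA_eq_altLoop (d : List Int) :
    ∀ (ls : List Int) (i : Nat), scanA d ls i = altLoop d ls i := by
  intro ls
  induction ls with
  | nil => intro i; rw [scanA_nil]; rfl
  | cons t ts ih =>
    intro i
    have hstep : ∀ (fuel i : Nat), d.length - 1 - i ≤ fuel →
        scanA d (t :: ts) i = altLoop d (t :: ts) i := by
      intro fuel
      induction fuel with
      | zero =>
        intro i hfuel
        rw [scanA, dif_neg (by omega), altLoop]
        rw [if_pos (le_trans (by omega) (advanceCursor_ge d t i))]
      | succ fuel ihf =>
        intro i hfuel
        by_cases hil : i < d.length - 1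
        · rw [scanA, dif_pos hil]
          by_cases hc : d.getD i 0 ≤ t ∧ t < d.getD (i + 1) 0
          · rw [if_pos hc, altLoop]
            rw [show advanceCursor d t i = i from by
              rw [advanceCursor, dif_pos hil, if_neg (by simpa using hc)]]
            rw [if_neg (by omega), ih (i + 1)]
          · rw [if_neg hc, ihf (i + 1) (by omega)]
            rw [altLoop, altLoop]
            rw [show advanceCursor d t i = advanceCursor d t (i + 1) from by
              conv_lhs => rw [advanceCursor]
              rw [dif_pos hil, if_pos (by simpa using hc)]]
        · rw [scanA, dif_neg hil, altLoop]
          rw [if_pos (le_trans (by omega) (advanceCursor_ge d t i))]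
    exact hstep (d.length - 1 - i) i (le_refl _)
-- ===== VERDICT (by name: the statement is the Claim_ definition above) =====
theorem find_Rtime_spec : Claim_equal_find_Rtime := by
  intro label_time data_time _hdom
  unfold Spec_find_Rtime find_Rtime_alt
  rw [find_Rtime_eq_scanA, scanA_eq_altLoop]
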